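-- pv_equiv track=rewrite | github.com/Steve-Teal/eforth-misc16 | miscasm.py | expandstrings
-- ===== SOURCE A (Python) =====
-- def expandstrings(line):
--     expand = False
--     returnline = ""
--     for char in line:
--         if char == "'":
--             expand = not expand
--             continue
--         if expand:
--             returnline += " {:d} ".format(ord(char))
--         elif char == ',':
--             returnline += ' '
--         else:
--             returnline += "{:s}".format(char)
--     return returnline
-- ===== SOURCE B (Python) =====
-- def expandstrings(line):
--     parts = []
--     for i, seg in enumerate(line.split("'")):
--         if i % 2:
--             parts.append(''.join(' {:d} '.format(ord(c)) for c in seg))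
--         else:
--             parts.append(''.join(' ' if c == ',' else c for c in seg))
--     return ''.join(parts)
-- ===== Notes on version B (the rewrite author's own statement) =====
-- stated objective: simpler
-- what changed: Replaced the stateful expand-flag character scan that appends to one string char by char with split-on-quote followed by mapping segments by index parity (even = outside quotes, odd = inside) and one final join.
import Mathlib
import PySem

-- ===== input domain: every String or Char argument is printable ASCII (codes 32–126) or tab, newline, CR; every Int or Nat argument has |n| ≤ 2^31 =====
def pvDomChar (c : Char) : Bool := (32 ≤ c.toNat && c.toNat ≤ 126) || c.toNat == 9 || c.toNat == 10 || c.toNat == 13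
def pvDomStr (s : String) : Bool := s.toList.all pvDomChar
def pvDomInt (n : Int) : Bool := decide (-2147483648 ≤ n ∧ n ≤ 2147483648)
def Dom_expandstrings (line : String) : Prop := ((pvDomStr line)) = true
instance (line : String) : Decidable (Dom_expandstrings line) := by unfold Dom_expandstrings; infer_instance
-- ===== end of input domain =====

-- B replaces A's stateful quote-toggle scan by split-on-quote then map segments by index parity (simpler).

-- ===== PORT A =====
-- A: one pass with an expand flag toggled by quotes; inside quotes each char becomes " <ord> ",
-- outside quotes ',' becomes ' ' and any other char is kept.
def pvStepA (st : Bool × List Char) (char : Char) : Bool × List Char :=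
  let expand := st.1
  let returnline := st.2
  if char = '\'' then (!expand, returnline)
  else if expand then (expand, returnline ++ ([' '] ++ PySem.Int.toChars (char.toNat : Int) ++ [' ']))
  else if char = ',' then (expand, returnline ++ [' '])
  else (expand, returnline ++ [char])

def expandstrings (line : String) : String :=
  let st := line.toList.foldl pvStepA (false, [])
  String.mk st.2

-- ===== PORT B =====
-- B: split the line on "'", then even-indexed segments are outside quotes and odd-indexed inside.
def expandstrings_alt (line : String) : String :=
  let segs := PySem.Chars.splitOn line.toList ['\'']
  let parts := (PySem.List.enumerate segs).map (fun p =>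
      if PySem.Int.mod p.1 2 ≠ 0 then
        (p.2.map (fun c => [' '] ++ PySem.Int.toChars (c.toNat : Int) ++ [' '])).flatten
      else
        (p.2.map (fun c => if c = ',' then [' '] else [c])).flatten)
  String.mk parts.flatten

-- ===== PRECONDITION & SPEC =====
def Spec_expandstrings (line : String) (out : String) : Prop := out = expandstrings_alt line
instance (line : String) (out : String) : Decidable (Spec_expandstrings line out) := by unfold Spec_expandstrings; infer_instance

-- ===== CLAIM (what is proved, stated in full; the proofs are below) =====
def Claim_equal_expandstrings : Prop := ∀ (line : String), Dom_expandstrings line → Spec_expandstrings line (expandstrings line)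

-- ===== LEMMAS AND PROOFS =====

-- per-character expansions
def pvInChar (c : Char) : List Char := [' '] ++ PySem.Int.toChars (c.toNat : Int) ++ [' ']
def pvOutChar (c : Char) : List Char := if c = ',' then [' '] else [c]

-- reference recursion: what A appends from flag state e on the rest of the line
def pvRest (e : Bool) : List Char → List Char
  | [] => []
  | c :: t => if c = '\'' then pvRest (!e) t else (if e then pvInChar c else pvOutChar c) ++ pvRest e t

-- simple structural characterisation of splitOn on the single-char separator '
def pvSplitQ : List Char → List (List Char)
  | [] => [[]]
  | c :: t =>
    let r := pvSplitQ t
    if c = '\'' then [] :: r else (c :: r.headI) :: r.tail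

theorem pvSplitQ_ne_nil (l : List Char) : pvSplitQ l ≠ [] := by
  cases l with
  | nil => simp [pvSplitQ]
  | cons c t => simp only [pvSplitQ]; split <;> simp

-- cons x onto the first piece
def pvConsHead (x : List Char) : List (List Char) → List (List Char)
  | [] => [x]
  | h :: t => (x ++ h) :: t

theorem pvGo_eq (l : List Char) : ∀ (fuel : Nat) (cur : List Char) (accs : List (List Char)),
    l.length ≤ fuel →
    PySem.Chars.splitOn.go ['\''] fuel l cur accs.reverse
      = accs ++ pvConsHead cur.reverse (pvSplitQ l) := by
  induction l with
  | nil =>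
    intro fuel cur accs _
    cases fuel <;> simp [PySem.Chars.splitOn.go, pvSplitQ, pvConsHead]
  | cons c t ih =>
    intro fuel cur accs h
    cases fuel with
    | zero => simp at h
    | succ f =>
      by_cases hc : c = '\''
      · subst hc
        have hstep : PySem.Chars.splitOn.go ['\''] (f+1) ('\'' :: t) cur accs.reverse
            = PySem.Chars.splitOn.go ['\''] f t [] (accs ++ [cur.reverse]).reverse := by
          simp [PySem.Chars.splitOn.go, List.isPrefixOf]
        rw [hstep, ih f [] (accs ++ [cur.reverse]) (by simpa using h)]
        simp only [pvSplitQ, if_true]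
        cases hs : pvSplitQ t with
        | nil => exact absurd hs (pvSplitQ_ne_nil t)
        | cons a b => simp [pvConsHead]
      · have hstep : PySem.Chars.splitOn.go ['\''] (f+1) (c :: t) cur accs.reverse
            = PySem.Chars.splitOn.go ['\''] f t (c :: cur) accs.reverse := by
          simp only [PySem.Chars.splitOn.go, List.isPrefixOf, Bool.and_true]
          rw [if_neg (by simpa using fun h => hc h.symm)]
        rw [hstep, ih f (c :: cur) accs (by simpa using Nat.le_of_succ_le_succ h)]
        simp only [pvSplitQ, if_neg hc]
        cases hs : pvSplitQ t with
        | nil => exact absurd hs (pvSplitQ_ne_nil t)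
        | cons a b => simp [pvConsHead]

theorem pvSplitOn_eq (l : List Char) : PySem.Chars.splitOn l ['\''] = pvSplitQ l := by
  have h := pvGo_eq l (l.length + 1) [] [] (by omega)
  rw [PySem.Chars.splitOn]
  simp only [List.reverse_nil] at h
  rw [h]
  cases hs : pvSplitQ l with
  | nil => exact absurd hs (pvSplitQ_ne_nil l)
  | cons a b => simp [pvConsHead]

-- A-side: the fold computes acc ++ pvRest e l
theorem pvFoldA (l : List Char) : ∀ (e : Bool) (acc : List Char),
    (l.foldl pvStepA (e, acc)).2 = acc ++ pvRest e l := by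
  induction l with
  | nil => intro e acc; simp [pvRest]
  | cons c t ih =>
    intro e acc
    rw [List.foldl_cons]
    by_cases hc : c = '\''
    · subst hc; simp [pvStepA, pvRest, ih]
    · cases e with
      | false =>
        by_cases hcm : c = ','
        · subst hcm; simp [pvStepA, pvRest, pvOutChar, ih]
        · simp [pvStepA, pvRest, pvOutChar, hc, hcm, ih]
      | true => simp [pvStepA, pvRest, pvInChar, hc, ih]

-- B-side: segment-by-parity processing of pvSplitQ equals pvRest
def pvJoinProc (e : Bool) : List (List Char) → List Char
  | [] => []
  | s :: t => (if e then (s.map pvInChar).flatten else (s.map pvOutChar).flatten) ++ pvJoinProc (!e) t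

theorem pvJoinProc_splitQ (l : List Char) : ∀ e, pvJoinProc e (pvSplitQ l) = pvRest e l := by
  induction l with
  | nil => intro e; simp [pvSplitQ, pvJoinProc, pvRest]
  | cons c t ih =>
    intro e
    by_cases hc : c = '\''
    · subst hc
      simp only [pvSplitQ, pvRest, if_true]
      simp [pvJoinProc, ih]
    · simp only [pvSplitQ, if_neg hc]
      cases hs : pvSplitQ t with
      | nil => exact absurd hs (pvSplitQ_ne_nil t)
      | cons a b =>
        have ht : pvJoinProc e (a :: b) = pvRest e t := by rw [← hs]; exact ih e
        cases e <;> simp_all [pvJoinProc, pvRest]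

-- the enumerate/mod form of B equals pvJoinProc, for any start index of the right parity
theorem pvEnum_eq (segs : List (List Char)) : ∀ (s : Int),
    ((PySem.List.enumerate segs s).map (fun p =>
      if PySem.Int.mod p.1 2 ≠ 0 then
        (p.2.map (fun c => [' '] ++ PySem.Int.toChars (c.toNat : Int) ++ [' '])).flatten
      else
        (p.2.map (fun c => if c = ',' then [' '] else [c])).flatten)).flatten
    = pvJoinProc (decide (PySem.Int.mod s 2 ≠ 0)) segs := by
  induction segs with
  | nil => intro s; simp [PySem.List.enumerate, pvJoinProc]
  | cons a b ih =>
    intro s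
    rw [PySem.List.enumerate_cons]
    have e1 : (PySem.Int.mod s 2 ≠ 0) ↔ (s % 2 = 1) := by
      simp only [PySem.Int.mod, Int.fmod_eq_emod]
      omega
    by_cases h : s % 2 = 1
    · have h3 : ¬ ((s+1) % 2 = 1) := by omega
      simp only [List.map_cons, List.flatten_cons, ih (s+1), pvJoinProc]
      simp [h, h3]
      rfl
    · have h3 : (s+1) % 2 = 1 := by omega
      simp only [List.map_cons, List.flatten_cons, ih (s+1), pvJoinProc]
      simp [h, h3]
      rfl

-- ===== VERDICT (by name: the statement is the Claim_ definition above) =====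
theorem expandstrings_spec : Claim_equal_expandstrings := by
  intro line _
  unfold Spec_expandstrings expandstrings expandstrings_alt
  simp only [pvSplitOn_eq, pvFoldA]
  rw [pvEnum_eq]
  simp [pvJoinProc_splitQ, PySem.Int.mod]
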